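-- pv_equiv track=rewrite | github.com/bogdanov-d-a/ed_python_utils | edpu/dir_suffix_switcher/utils.py | get_false_key
-- ===== SOURCE A (Python) =====
-- def get_false_key(dict_: dict[str, bool]) -> str:
--     from typing import Optional
--
--     result: Optional[str] = None
--
--     for key, value in dict_.items():
--         if not value:
--             if result is not None:
--                 raise Exception('result is not None')
--             result = key
--
--     if result is None:
--         raise Exception('result is None')
--
--     return result
-- ===== SOURCE B (Python) =====
-- def get_false_key(dict_: dict[str, bool]) -> str:
--     # Sort items by value (False sorts before True); then the answer, if any,
--     # sits at the front, and a second falsy item would sit right behind it.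
--     items = sorted(dict_.items(), key=lambda kv: kv[1])
--     if not items or items[0][1]:
--         raise Exception('result is None')
--     if len(items) > 1 and not items[1][1]:
--         raise Exception('result is not None')
--     return items[0][0]
-- ===== Notes on version B (the rewrite author's own statement) =====
-- stated objective: alternative
-- what changed: Replaces A's accumulate-and-raise-on-second loop by sorting the items by value (False first) and inspecting only the first two positions of the sorted list, with the same exception messages.
import Mathlib
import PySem

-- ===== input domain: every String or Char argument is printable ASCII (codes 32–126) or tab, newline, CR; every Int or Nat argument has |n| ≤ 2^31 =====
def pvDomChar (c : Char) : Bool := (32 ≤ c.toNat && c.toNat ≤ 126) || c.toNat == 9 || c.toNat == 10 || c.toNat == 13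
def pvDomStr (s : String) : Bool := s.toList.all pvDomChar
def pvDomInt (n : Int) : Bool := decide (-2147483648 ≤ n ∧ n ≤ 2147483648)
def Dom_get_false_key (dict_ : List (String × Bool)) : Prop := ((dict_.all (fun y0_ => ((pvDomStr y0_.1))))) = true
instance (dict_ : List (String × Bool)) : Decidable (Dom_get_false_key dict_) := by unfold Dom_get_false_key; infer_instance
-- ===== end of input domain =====

-- B sorts the items by value (False first) and inspects the first two positions instead of A's accumulate-and-raise-on-second loop (objective: alternative).


-- ===== PORT A =====
-- A's loop over dict_.items() with state `result : Option String`; the outer Option is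
-- none exactly where the Python raises (second falsy value seen).
def get_false_key_loop : List (String × Bool) → Option String → Option (Option String)
  | [], result => some result
  | (key, value) :: rest, result =>
    if !value then
      match result with
      | some _ => none                      -- raise Exception('result is not None')
      | none => get_false_key_loop rest (some key)
    else
      get_false_key_loop rest result

def get_false_key (dict_ : List (String × Bool)) : String :=
  match get_false_key_loop (PySem.Dict.ofList dict_).items none with
  | none => ""                              -- raise Exception('result is not None')
  | some none => ""                         -- raise Exception('result is None')
  | some (some result) => result

-- ===== PORT B =====
-- Source B: sort the items by value (False < True, stable), then look only at the
-- first two positions of the sorted list.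
def get_false_key_alt (dict_ : List (String × Bool)) : String :=
  let items := PySem.List.sorted (PySem.Dict.ofList dict_).items (fun kv => kv.2) false
  match items with
  | [] => ""                                -- raise Exception('result is None')   (not items)
  | (k0, v0) :: rest =>
    if v0 then ""                           -- raise Exception('result is None')   (items[0][1])
    else
      match rest with
      | (_, v1) :: _ =>
        if !v1 then ""                      -- raise Exception('result is not None')
        else k0
      | [] => k0

-- ===== PRECONDITION & SPEC =====
-- A (and B) raise an Exception unless the dict has exactly one key with a falsy value;
-- Pre_ admits exactly the inputs on which the Python A returns normally.
def Pre_get_false_key (dict_ : List (String × Bool)) : Prop :=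
  ((PySem.Dict.ofList dict_).items.filter (fun p => !p.2)).length = 1
instance (dict_ : List (String × Bool)) : Decidable (Pre_get_false_key dict_) := by
  unfold Pre_get_false_key; infer_instance

def pvWitness_get_false_key : (List (String × Bool)) := [("a", true), ("b", false)]

def Spec_get_false_key (dict_ : List (String × Bool)) (out : String) : Prop := out = get_false_key_alt dict_
instance (dict_ : List (String × Bool)) (out : String) : Decidable (Spec_get_false_key dict_ out) := by unfold Spec_get_false_key; infer_instance

-- ===== CLAIM (what is proved, stated in full; the proofs are below) =====
def Claim_equal_get_false_key : Prop := ∀ (dict_ : List (String × Bool)), Dom_get_false_key dict_ → Pre_get_false_key dict_ → Spec_get_false_key dict_ (get_false_key dict_)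

-- ===== LEMMAS AND PROOFS =====

-- once a falsy key is held, the loop succeeds iff no further falsy value appears
lemma get_false_key_loop_some (l : List (String × Bool)) (k : String)
    (h : l.filter (fun p => !p.2) = []) :
    get_false_key_loop l (some k) = some (some k) := by
  induction l with
  | nil => rfl
  | cons p rest ih =>
    obtain ⟨key, value⟩ := p
    simp only [List.filter] at h
    cases hv : (!value) with
    | true => simp [hv] at h
    | false =>
      simp only [hv] at h
      simp [get_false_key_loop, hv, ih h]

lemma get_false_key_loop_none (l : List (String × Bool))
    (h : (l.filter (fun p => !p.2)).length = 1) :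
    get_false_key_loop l none =
      some (some (((l.filter (fun p => !p.2)).map Prod.fst).headD "")) := by
  induction l with
  | nil => simp at h
  | cons p rest ih =>
    obtain ⟨key, value⟩ := p
    cases hv : (!value) with
    | false =>
      have hf : ((key, value) :: rest).filter (fun p => !p.2) = rest.filter (fun p => !p.2) := by
        simp [List.filter, hv]
      rw [hf] at h ⊢
      simpa [get_false_key_loop, hv] using ih h
    | true =>
      have hf : ((key, value) :: rest).filter (fun p => !p.2)
          = (key, value) :: rest.filter (fun p => !p.2) := by
        simp [List.filter, hv]
      rw [hf] at h ⊢
      have hrest : rest.filter (fun p => !p.2) = [] := by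
        rw [List.length_cons] at h
        exact List.length_eq_zero_iff.mp (by omega)
      simp [get_false_key_loop, hv, get_false_key_loop_some _ _ hrest]

-- ===== VERDICT (by name: the statement is the Claim_ definition above) =====
theorem get_false_key_spec : Claim_equal_get_false_key := by
  intro dict_ _ hpre
  unfold Pre_get_false_key at hpre
  set l := (PySem.Dict.ofList dict_).items with hl
  -- the unique falsy item
  obtain ⟨f, hf⟩ : ∃ f, l.filter (fun p => !p.2) = [f] := by
    cases h : l.filter (fun p => !p.2) with
    | nil => simp [h] at hpre
    | cons a t =>
      cases t with
      | nil => exact ⟨a, rfl⟩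
      | cons b t' => simp [h] at hpre
  have hfm : f ∈ l ∧ f.2 = false := by
    have : f ∈ l.filter (fun p => !p.2) := by simp [hf]
    simpa using List.mem_filter.mp this
  -- A's value is f.1
  unfold Spec_get_false_key get_false_key
  rw [← hl, get_false_key_loop_none _ hpre, hf]
  -- B's side: analyse the sorted list
  unfold get_false_key_alt
  rw [← hl]
  cases hs : PySem.List.sorted l (fun kv => kv.2) false with
  | nil =>
    exfalso
    have := (PySem.List.sorted_eq_nil_iff l (fun kv => kv.2) false).mp hs
    rw [this] at hfm
    exact absurd hfm.1 (List.not_mem_nil)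
  | cons m t =>
    -- head of the sorted list is falsy, hence equals f
    have hmle : m.2 ≤ f.2 := PySem.List.key_head_sorted_le l (fun kv => kv.2) hs f hfm.1
    have hmv : m.2 = false := by
      rw [hfm.2] at hmle
      cases h2 : m.2 with
      | false => rfl
      | true => rw [h2] at hmle; exact absurd hmle (by decide)
    have hml : m ∈ l := by
      have : m ∈ PySem.List.sorted l (fun kv => kv.2) false := by simp [hs]
      exact (PySem.List.mem_sorted l (fun kv => kv.2) false m).mp this
    have hmf : m = f := by
      have : m ∈ l.filter (fun p => !p.2) := List.mem_filter.mpr ⟨hml, by simp [hmv]⟩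
      rw [hf] at this; simpa using this
    -- the tail contains no falsy item
    have hperm : (PySem.List.sorted l (fun kv => kv.2) false).Perm l :=
      PySem.List.sorted_perm l (fun kv => kv.2) false
    have hlen : ((m :: t).filter (fun p => !p.2)).length = 1 := by
      rw [← hs]
      rw [(hperm.filter (fun p => !p.2)).length_eq, hpre]
    have htfilter : t.filter (fun p => !p.2) = [] := by
      have : ((m :: t).filter (fun p => !p.2)) = m :: t.filter (fun p => !p.2) := by
        simp [List.filter, hmv]
      rw [this, List.length_cons] at hlen
      exact List.length_eq_zero_iff.mp (by omega)
    obtain ⟨mk, mv⟩ := m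
    simp only at hmv
    subst hmv
    cases t with
    | nil =>
      simp only [Bool.false_eq_true, if_false]
      rw [← hmf]
      rfl
    | cons b t' =>
      obtain ⟨bk, bv⟩ := b
      have hbv : bv = true := by
        by_contra hb
        have hb' : bv = false := by simpa using hb
        subst hb'
        simp [List.filter] at htfilter
      subst hbv
      simp only [Bool.false_eq_true, if_false, Bool.not_true, if_false]
      rw [← hmf]
      rfl
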